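-- pv_equiv track=rewrite | github.com/alpaka206/stock | apps/api/app/services/providers/real.py | _align_history_event_date
-- ===== SOURCE A (Python) =====
-- def _align_history_event_date(
--     event_date: str, series_dates: list[str]
-- ) -> str | None:
--     if not event_date or not series_dates:
--         return None
--
--     earliest = series_dates[0]
--     latest = series_dates[-1]
--     if event_date < earliest or event_date > latest:
--         return None
--
--     aligned_date: str | None = None
--     for candidate in series_dates:
--         if candidate <= event_date:
--             aligned_date = candidate
--             continue
--         break
--
--     return aligned_date or earliest
-- ===== SOURCE B (Python) =====
-- def _align_history_event_date(event_date, series_dates):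
--     if not event_date or not series_dates:
--         return None
--     if event_date < series_dates[0] or event_date > series_dates[-1]:
--         return None
--     lo, hi = 0, len(series_dates)
--     while lo < hi:
--         mid = (lo + hi) // 2
--         if event_date < series_dates[mid]:
--             hi = mid
--         else:
--             lo = mid + 1
--     return series_dates[lo - 1]
-- ===== Notes on version B (the rewrite author's own statement) =====
-- stated objective: alternative
-- what changed: Replaces A's linear forward scan for the last series date <= event_date with a hand-written binary search (bisect_right - 1); Pre_ therefore restricts the claim to ascending series_dates (a date series' natural invariant) plus all trivially rejected inputs, excluding unsorted series whose range contains event_date, where A's prefix-scan value is an implementation artefact.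
-- outside the precondition, e.g. on _align_history_event_date('c', ['a', 'd', 'b', 'e']): A returns 'a', B returns 'b'
import Mathlib
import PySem

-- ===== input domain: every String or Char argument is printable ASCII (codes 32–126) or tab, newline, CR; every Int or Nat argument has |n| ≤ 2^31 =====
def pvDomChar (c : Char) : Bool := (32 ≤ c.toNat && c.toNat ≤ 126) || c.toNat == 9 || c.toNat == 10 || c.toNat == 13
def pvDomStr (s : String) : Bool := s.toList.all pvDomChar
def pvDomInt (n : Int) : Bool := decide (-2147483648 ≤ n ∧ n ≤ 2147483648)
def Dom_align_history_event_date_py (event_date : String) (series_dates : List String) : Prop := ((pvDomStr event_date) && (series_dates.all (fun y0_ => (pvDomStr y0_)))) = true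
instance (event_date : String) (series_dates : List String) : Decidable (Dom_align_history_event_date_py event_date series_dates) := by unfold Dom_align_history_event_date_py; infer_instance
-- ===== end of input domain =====

-- B replaces A's linear scan by a binary search (bisect_right - 1) on the sorted series;
-- equivalence is proved on ascending series_dates (Pre_), the series' natural invariant.

-- ===== PORT A =====
-- the for-candidate loop of A, carrying the mutable aligned_date
def alignLoopA (event_date : String) : List String → Option String → Option String
  | [], acc => acc
  | c :: rest, acc =>
    if c ≤ event_date then alignLoopA event_date rest (some c) else acc

def align_history_event_date_py (event_date : String) (series_dates : List String) : Option String :=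
  if event_date = "" ∨ series_dates = [] then none
  else
    match PySem.List.pyGet? series_dates 0, PySem.List.pyGet? series_dates (-1) with
    | some earliest, some latest =>
      if event_date < earliest ∨ latest < event_date then none
      else
        match alignLoopA event_date series_dates none with
        | some d => if d = "" then some earliest else some d   -- 'aligned_date or earliest'
        | none => some earliest
    | _, _ => none   -- unreachable: the list is nonempty here

-- ===== PORT B =====
-- the while lo < hi loop of Source B; fuel = initial (hi - lo), enough for every iteration
def bisectLoopB (event_date : String) (sd : List String) : Nat → Int → Int → Int
  | 0, lo, _ => lo
  | fuel + 1, lo, hi =>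
    if lo < hi then
      let mid := PySem.Int.floordiv (lo + hi) 2
      if event_date < (PySem.List.pyGet? sd mid).getD "" then   -- in range on every reachable call
        bisectLoopB event_date sd fuel lo mid
      else
        bisectLoopB event_date sd fuel (mid + 1) hi
    else lo

def align_history_event_date_py_alt (event_date : String) (series_dates : List String) : Option String :=
  if event_date = "" ∨ series_dates = [] then none
  else
    match PySem.List.pyGet? series_dates 0 with
    | none => none   -- unreachable: the list is nonempty here
    | some first =>
      match PySem.List.pyGet? series_dates (-1) with
      | none => none
      | some last =>
        if event_date < first ∨ last < event_date then none
        else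
          let lo := bisectLoopB event_date series_dates series_dates.length 0
            (series_dates.length : Int)
          PySem.List.pyGet? series_dates (lo - 1)

-- ===== PRECONDITION & SPEC =====
-- Pre_ excludes unsorted series whose range still contains event_date: a date series is
-- ascending by contract, B's binary search assumes it, and A's prefix-scan value on an
-- unsorted series is an artefact of its implementation. All trivially rejected inputs
-- (empty event_date, empty series, event_date outside [first, last]) stay inside Pre_.
def Pre_align_history_event_date_py (event_date : String) (series_dates : List String) : Prop :=
  List.Pairwise (fun a b => a.toList ≤ b.toList) series_dates ∨
  event_date = "" ∨ series_dates = [] ∨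
  event_date.toList < series_dates.headI.toList ∨
  series_dates.getLastI.toList < event_date.toList
instance (event_date : String) (series_dates : List String) : Decidable (Pre_align_history_event_date_py event_date series_dates) := by unfold Pre_align_history_event_date_py; infer_instance

def pvWitness_align_history_event_date_py : String × List String := ("b", ["a", "c"])

def Spec_align_history_event_date_py (event_date : String) (series_dates : List String) (out : Option String) : Prop := out = align_history_event_date_py_alt event_date series_dates
instance (event_date : String) (series_dates : List String) (out : Option String) : Decidable (Spec_align_history_event_date_py event_date series_dates out) := by unfold Spec_align_history_event_date_py; infer_instance

-- ===== CLAIM (what is proved, stated in full; the proofs are below) =====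
def Claim_equal_align_history_event_date_py : Prop := ∀ (event_date : String) (series_dates : List String), Dom_align_history_event_date_py event_date series_dates → Pre_align_history_event_date_py event_date series_dates → Spec_align_history_event_date_py event_date series_dates (align_history_event_date_py event_date series_dates)


-- ===== LEMMAS AND PROOFS =====

-- every string is ≥ the empty string
theorem pv_empty_le (s : String) : ("" : String) ≤ s := by
  by_contra h
  have h2 : s < "" := lt_of_not_ge h
  rw [String.lt_iff_toList_lt] at h2
  exact List.not_lt_nil _ h2

-- A's loop returns the last element of the ≤-prefix, else its accumulator
theorem alignLoopA_eq (event_date : String) (sd : List String) (acc : Option String) :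
    alignLoopA event_date sd acc =
      Option.or ((sd.takeWhile (fun c => c ≤ event_date)).getLast?) acc := by
  induction sd generalizing acc with
  | nil => simp [alignLoopA]
  | cons c r ih =>
    rw [show alignLoopA event_date (c :: r) acc =
        (if c ≤ event_date then alignLoopA event_date r (some c) else acc) from rfl]
    by_cases hc : c ≤ event_date
    · rw [if_pos hc, ih, List.takeWhile_cons, if_pos (decide_eq_true hc),
        List.getLast?_cons]
      cases h : (r.takeWhile (fun c => decide (c ≤ event_date))).getLast? <;>
        simp [h, Option.or]
    · rw [if_neg hc, List.takeWhile_cons,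
        if_neg (by simpa using hc : ¬ decide (c ≤ event_date) = true)]
      rfl

-- monotonicity of a sorted list at the level of indices
theorem pv_sorted_mono {sd : List String} (hs : List.Pairwise (· ≤ ·) sd)
    (i j : Nat) (hj : j < sd.length) (hij : i ≤ j) : sd[i]'(lt_of_le_of_lt hij hj) ≤ sd[j] := by
  rcases Nat.lt_or_ge i j with h | h
  · exact (List.pairwise_iff_getElem.mp hs) i j (lt_of_le_of_lt hij hj) hj h
  · have : i = j := le_antisymm hij h
    subst this; exact le_refl _

-- the binary-search loop invariant: the result splits sd into a ≤ event_date prefix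
-- and a > event_date suffix
theorem bisectLoopB_inv (event_date : String) (sd : List String)
    (hs : List.Pairwise (· ≤ ·) sd) :
    ∀ (fuel : Nat) (lo hi : Int), 0 ≤ lo → lo ≤ hi → hi ≤ sd.length → hi - lo ≤ fuel →
    (∀ (i : Nat) (h : i < sd.length), (i : Int) < lo → sd[i] ≤ event_date) →
    (∀ (i : Nat) (h : i < sd.length), hi ≤ (i : Int) → event_date < sd[i]) →
    0 ≤ bisectLoopB event_date sd fuel lo hi ∧
    bisectLoopB event_date sd fuel lo hi ≤ sd.length ∧
    (∀ (i : Nat) (h : i < sd.length), (i : Int) < bisectLoopB event_date sd fuel lo hi →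
      sd[i] ≤ event_date) ∧
    (∀ (i : Nat) (h : i < sd.length), bisectLoopB event_date sd fuel lo hi ≤ (i : Int) →
      event_date < sd[i]) := by
  intro fuel
  induction fuel with
  | zero =>
    intro lo hi h0 hlh hhl hf hplo hphi
    have : lo = hi := by omega
    subst this
    exact ⟨h0, by simpa [bisectLoopB] using hhl, fun i h hi => hplo i h hi,
      fun i h hi => hphi i h hi⟩
  | succ n ih =>
    intro lo hi h0 hlh hhl hf hplo hphi
    by_cases hlt : lo < hi
    · have hmid := PySem.Int.floordiv_two_mid_bounds (le_of_lt hlt)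
      set mid := PySem.Int.floordiv (lo + hi) 2 with hmiddef
      have hmid2 : lo ≤ mid ∧ mid < hi := by
        rw [hmiddef, PySem.Int.floordiv_eq_ediv_of_pos (by norm_num)]
        omega
      have hmr0 : 0 ≤ mid := le_trans h0 hmid2.1
      have hmrl : mid < (sd.length : Int) := lt_of_lt_of_le hmid2.2 hhl
      have hget : (PySem.List.pyGet? sd mid).getD "" = sd[mid.toNat]'(by omega) := by
        rw [PySem.List.pyGet?_eq_some_getElem sd hmr0 hmrl]; rfl
      by_cases hbr : event_date < (PySem.List.pyGet? sd mid).getD ""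
      · have hstep : bisectLoopB event_date sd (n + 1) lo hi =
            bisectLoopB event_date sd n lo mid := by
          simp only [bisectLoopB, if_pos hlt, ← hmiddef, if_pos hbr]
        rw [hstep]
        refine ih lo mid h0 hmid2.1 (by omega) (by omega) hplo ?_
        intro i h hi2
        have : sd[mid.toNat]'(by omega) ≤ sd[i] :=
          pv_sorted_mono hs mid.toNat i h (by omega)
        rw [hget] at hbr
        exact lt_of_lt_of_le hbr this
      · have hstep : bisectLoopB event_date sd (n + 1) lo hi =
            bisectLoopB event_date sd n (mid + 1) hi := by
          simp only [bisectLoopB, if_pos hlt, ← hmiddef, if_neg hbr]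
        rw [hstep]
        refine ih (mid + 1) hi (by omega) (by omega) hhl (by omega) ?_ hphi
        intro i h hi2
        have h1 : sd[i] ≤ sd[mid.toNat]'(by omega) :=
          pv_sorted_mono hs i mid.toNat (by omega) (by omega)
        rw [hget] at hbr
        exact le_trans h1 (le_of_not_gt hbr)
    · have : bisectLoopB event_date sd (n + 1) lo hi = lo := by
        simp [bisectLoopB, hlt]
      rw [this]
      exact ⟨h0, le_trans hlh hhl, fun i h hi => hplo i h hi,
        fun i h hi => hphi i h (le_trans (le_of_not_gt hlt) hi)⟩

-- a two-sided split determines the takeWhile length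
theorem takeWhile_len_eq (p : String → Bool) (sd : List String) (r : Nat)
    (hr : r ≤ sd.length)
    (h1 : ∀ (i : Nat) (h : i < sd.length), i < r → p sd[i])
    (h2 : ∀ (i : Nat) (h : i < sd.length), r ≤ i → ¬ p sd[i] = true) :
    (sd.takeWhile p).length = r := by
  induction sd generalizing r with
  | nil =>
    simp only [List.length_nil, Nat.le_zero] at hr
    simp [hr]
  | cons c t ih =>
    cases r with
    | zero =>
      have h0 := h2 0 (by simp) (Nat.zero_le 0)
      simp only [List.getElem_cons_zero] at h0
      simp [List.takeWhile_cons, h0]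
    | succ r' =>
      have hc := h1 0 (by simp) (Nat.succ_pos r')
      simp only [List.getElem_cons_zero] at hc
      simp only [List.takeWhile_cons, hc, if_true, List.length_cons]
      congr 1
      refine ih r' (by simpa using hr) ?_ ?_
      · intro i h hi
        have := h1 (i + 1) (by simpa using Nat.succ_lt_succ h) (Nat.succ_lt_succ hi)
        simpa using this
      · intro i h hi
        have := h2 (i + 1) (by simpa using Nat.succ_lt_succ h) (Nat.succ_le_succ hi)
        simpa using this

-- ===== VERDICT (by name: the statement is the Claim_ definition above) =====
theorem align_history_event_date_py_spec : Claim_equal_align_history_event_date_py := by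
  intro event_date sd _hdom hpre
  unfold Spec_align_history_event_date_py
  unfold align_history_event_date_py align_history_event_date_py_alt
  by_cases hguard : event_date = "" ∨ sd = []
  · simp [hguard]
  · simp only [if_neg hguard]
    push_neg at hguard
    obtain ⟨hed, hne⟩ := hguard
    obtain ⟨e, rest, rfl⟩ := List.exists_cons_of_ne_nil hne
    set sd := e :: rest with hsd
    rw [PySem.List.pyGet?_zero_cons, PySem.List.pyGet?_neg_one]
    rw [List.getLast?_eq_getElem?]
    have hlen : 0 < sd.length := by simp [hsd]
    have hlast : sd[sd.length - 1]? = some (sd[sd.length - 1]'(by omega)) :=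
      List.getElem?_eq_getElem (by omega)
    rw [hlast]
    dsimp only
    by_cases hrange : event_date < e ∨ sd[sd.length - 1]'(by omega) < event_date
    · rw [if_pos hrange, if_pos hrange]
    · rw [if_neg hrange, if_neg hrange]
      push_neg at hrange
      obtain ⟨hlo, hhi⟩ := hrange
      -- inside the range, Pre_ can only hold through its sortedness disjunct
      have hpre2 : List.Pairwise (fun a b : String => a.toList ≤ b.toList) sd := by
        rcases hpre with h | h | h | h | h
        · exact h
        · exact absurd h hed
        · exact absurd h hne
        · exfalso
          have he : sd.headI = e := rfl
          rw [he] at h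
          exact absurd (String.lt_iff_toList_lt.mpr h) (not_lt.mpr hlo)
        · exfalso
          have hgl : sd.getLastI = sd[sd.length - 1]'(by omega) := by
            rw [List.getLastI_eq_getLast?, List.getLast?_eq_getElem?, hlast]
            rfl
          rw [hgl] at h
          exact absurd (String.lt_iff_toList_lt.mpr h) (not_lt.mpr hhi)
      -- characterise A's side via the takeWhile prefix
      set p : String → Bool := fun c => c ≤ event_date with hp
      set k := (sd.takeWhile p).length with hk
      have hpre' : List.Pairwise (· ≤ ·) sd :=
        List.Pairwise.imp (fun h => String.le_iff_toList_le.mpr h) hpre2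
      have htp : sd.takeWhile p = sd.take k :=
        List.prefix_iff_eq_take.mp (List.takeWhile_prefix p)
      have hkle : k ≤ sd.length := by
        rw [hk]; exact (List.takeWhile_prefix p).length_le
      have hk1 : 1 ≤ k := by
        have hpe : p e = true := decide_eq_true hlo
        simp [hk, hsd, hpe]
      -- the binary search computes k
      have hbs := bisectLoopB_inv event_date sd hpre' sd.length 0 (sd.length : Int)
        (le_refl 0) (by positivity) (le_refl _) (by omega)
        (by intro i h hi; omega) (by intro i h hi; omega)
      obtain ⟨hb0, hbl, hbp, hbq⟩ := hbs
      set r := bisectLoopB event_date sd sd.length 0 (sd.length : Int) with hr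
      have hkr : k = r.toNat := by
        rw [hk]
        refine takeWhile_len_eq p sd r.toNat (by omega) ?_ ?_
        · intro i h hi
          have hir : (i : Int) < r := by omega
          simp only [hp, decide_eq_true_eq]
          exact hbp i h hir
        · intro i h hi
          have hir : r ≤ (i : Int) := by omega
          simp only [hp, decide_eq_true_eq]
          exact not_le_of_gt (hbq i h hir)
      have hrk : r = (k : Int) := by omega
      -- A's loop result
      rw [alignLoopA_eq]
      have hkl1 : k - 1 < sd.length := by omega
      have hklt : k - 1 < k := by omega
      have hgl : (sd.takeWhile p).getLast? = some (sd[k - 1]'hkl1) := by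
        rw [List.getLast?_eq_getElem?, ← hk, htp, List.getElem?_take, if_pos hklt]
        exact List.getElem?_eq_getElem hkl1
      rw [hgl]
      -- B's result
      have hbget : PySem.List.pyGet? sd (r - 1) = some (sd[k - 1]'hkl1) := by
        rw [hrk]
        rw [PySem.List.pyGet?_eq_some_getElem sd (by omega) (by omega)]
        congr 1
        congr 1
        omega
      rw [hbget]
      dsimp only [Option.or]
      by_cases hempty : sd[k - 1]'hkl1 = ""
      · have h0k : e ≤ sd[k - 1]'hkl1 := by
          have h00 : sd[0]'(by omega) ≤ sd[k - 1]'hkl1 :=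
            pv_sorted_mono hpre' 0 (k - 1) hkl1 (by omega)
          simpa using h00
        have he : e = "" := le_antisymm (hempty ▸ h0k) (pv_empty_le e)
        rw [if_pos hempty, he, hempty]
      · rw [if_neg hempty]
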